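-- pv_equiv track=rewrite | github.com/ImmaBawzz/LJV_Visual_Engine | 05_SCRIPTS/dashboard/app.py | _artifact_group_for_path
-- ===== SOURCE A (Python) =====
-- def _artifact_group_for_path(path: str) -> str:
--     normalized = path.lower()
--     known_prefixes = [
--         "04_output/youtube_16x9/",
--         "04_output/vertical_9x16/",
--         "04_output/square_1x1/",
--         "04_output/teasers/",
--         "04_output/clean_visualizer/",
--         "04_output/lyric_visualizer/",
--         "04_output/promo_cards/",
--         "04_output/release_bundle/",
--     ]
--     for prefix in known_prefixes:
--         if normalized.startswith(prefix):
--             return prefix.split("/")[1]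
--     return "other"
-- ===== SOURCE B (Python) =====
-- _GROUPS = {
--     "youtube_16x9", "vertical_9x16", "square_1x1", "teasers",
--     "clean_visualizer", "lyric_visualizer", "promo_cards", "release_bundle",
-- }
--
-- def _artifact_group_for_path(path: str) -> str:
--     normalized = path.lower()
--     if not normalized.startswith("04_output/"):
--         return "other"
--     rest = normalized[len("04_output/"):]
--     i = rest.find("/")
--     if i < 0:
--         return "other"
--     segment = rest[:i]
--     return segment if segment in _GROUPS else "other"
-- ===== Notes on version B (the rewrite author's own statement) =====
-- stated objective: simpler
-- what changed: Instead of scanning a list of eight full path prefixes with startswith, B checks the single constant prefix '04_output/' once, extracts the segment before the next '/', and looks it up in a set of the eight group names.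
import Mathlib
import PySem

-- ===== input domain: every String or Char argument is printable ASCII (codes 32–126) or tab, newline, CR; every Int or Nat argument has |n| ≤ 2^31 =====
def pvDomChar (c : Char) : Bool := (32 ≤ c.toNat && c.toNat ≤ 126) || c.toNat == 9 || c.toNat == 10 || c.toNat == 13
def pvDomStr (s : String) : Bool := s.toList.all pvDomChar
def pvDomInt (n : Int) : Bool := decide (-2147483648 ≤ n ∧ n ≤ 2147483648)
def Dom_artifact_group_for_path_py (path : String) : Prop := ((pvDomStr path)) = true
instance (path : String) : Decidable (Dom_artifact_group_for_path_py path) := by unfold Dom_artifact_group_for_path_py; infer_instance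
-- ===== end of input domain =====

-- B replaces A's scan over eight full path prefixes by one prefix check, one find of '/',
-- and a set lookup of the extracted segment (objective: simpler).


-- ===== PORT A =====
def pvKnownPrefixes : List String :=
  [ "04_output/youtube_16x9/",
    "04_output/vertical_9x16/",
    "04_output/square_1x1/",
    "04_output/teasers/",
    "04_output/clean_visualizer/",
    "04_output/lyric_visualizer/",
    "04_output/promo_cards/",
    "04_output/release_bundle/" ]

-- 'for prefix in known_prefixes: if normalized.startswith(prefix): return prefix.split("/")[1]'
-- (the [1] index always exists for these literal prefixes, so '.getD ""' is never the IndexError side)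
def pvAgLoop (normalized : String) : List String → String
  | [] => "other"
  | p :: ps =>
      if PySem.Str.startswith normalized p then
        (PySem.List.pyGet? ((PySem.Str.split? p "/").getD []) 1).getD ""
      else pvAgLoop normalized ps

def artifact_group_for_path_py (path : String) : String :=
  pvAgLoop (PySem.Str.lower path) pvKnownPrefixes

-- ===== PORT B =====
def pvGroups : List String :=
  PySem.Set.ofList
    [ "youtube_16x9", "vertical_9x16", "square_1x1", "teasers",
      "clean_visualizer", "lyric_visualizer", "promo_cards", "release_bundle" ]

def artifact_group_for_path_py_alt (path : String) : String :=
  let normalized := PySem.Str.lower path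
  if PySem.Str.startswith normalized "04_output/" then
    let rest := PySem.Str.slice normalized (some (PySem.Str.len "04_output/")) none
    let i := PySem.Str.find rest "/"
    if i < 0 then "other"
    else
      let segment := PySem.Str.slice rest none (some i)
      if pvGroups.contains segment then segment else "other"
  else "other"

-- ===== PRECONDITION & SPEC =====
def Spec_artifact_group_for_path_py (path : String) (out : String) : Prop := out = artifact_group_for_path_py_alt path
instance (path : String) (out : String) : Decidable (Spec_artifact_group_for_path_py path out) := by unfold Spec_artifact_group_for_path_py; infer_instance

-- ===== CLAIM (what is proved, stated in full; the proofs are below) =====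
def Claim_equal_artifact_group_for_path_py : Prop := ∀ (path : String), Dom_artifact_group_for_path_py path → Spec_artifact_group_for_path_py path (artifact_group_for_path_py path)

-- ===== LEMMAS AND PROOFS =====

-- '[c] <+: l' reads the head of l
theorem pv_singleton_prefix_iff (c : Char) (l : List Char) : ([c] <+: l) ↔ l.head? = some c := by
  cases l with
  | nil => simp
  | cons a t => simp [List.cons_prefix_cons, eq_comm]

-- first '/' of r sits at index k: r[k]? = '/', nothing before
theorem pv_find_slash (r : List Char) (hi : 0 ≤ PySem.Chars.find r ['/']) :
    r[(PySem.Chars.find r ['/']).toNat]? = some '/' ∧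
      ∀ j < (PySem.Chars.find r ['/']).toNat, r[j]? ≠ some '/' := by
  obtain ⟨h1, h2⟩ := PySem.Chars.find_spec hi
  rw [pv_singleton_prefix_iff, List.head?_drop] at h1
  refine ⟨h1, fun j hj hcontra => h2 j hj ?_⟩
  rw [pv_singleton_prefix_iff, List.head?_drop]
  exact hcontra

-- the group segment before the first '/' characterises the full-prefix test
theorem pv_key (r g : List Char) (hg : '/' ∉ g) (hi : 0 ≤ PySem.Chars.find r ['/']) :
    ((g ++ ['/']) <+: r) ↔ r.take (PySem.Chars.find r ['/']).toNat = g := by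
  obtain ⟨hk, hmin⟩ := pv_find_slash r hi
  set k := (PySem.Chars.find r ['/']).toNat with hkdef
  constructor
  · rintro ⟨t, ht⟩
    have ht' : g ++ '/' :: t = r := by rw [← ht]; simp
    have hglen : r[g.length]? = some '/' := by rw [← ht']; simp
    have hle : k ≤ g.length := by
      by_contra hlt
      exact hmin g.length (by omega) hglen
    have hge : g.length ≤ k := by
      by_contra hlt
      push Not at hlt
      have hget : r[k]? = some g[k] := by
        rw [← ht', List.getElem?_append_left hlt, List.getElem?_eq_getElem hlt]
      have hsl : g[k] = '/' := by rw [hget] at hk; exact Option.some.inj hk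
      exact hg (hsl ▸ List.getElem_mem hlt)
    have hke : g.length = k := le_antisymm hge hle
    rw [← ht', ← hke, List.take_left]
  · intro ht
    have hklt : k < r.length := by
      by_contra h
      push Not at h
      rw [List.getElem?_eq_none h] at hk
      exact (by simp at hk)
    have hrk : r[k] = '/' := by
      rw [List.getElem?_eq_getElem hklt] at hk; exact Option.some.inj hk
    have hdrop : r.drop k = '/' :: r.drop (k + 1) := by
      rw [List.drop_eq_getElem_cons hklt, hrk]
    refine ⟨r.drop (k + 1), ?_⟩
    rw [← ht, List.append_assoc, List.singleton_append, ← hdrop, List.take_append_drop]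
-- a full known prefix cannot match when the base "04_output/" does not
theorem pv_sw_false (s p : String) (h : ¬ ("04_output/".toList <+: s.toList))
    (hp : "04_output/".toList <+: p.toList) : PySem.Str.startswith s p = false := by
  rw [PySem.Str.startswith_eq]
  exact Bool.eq_false_iff.2 fun hc => h (hp.trans ((PySem.Chars.startswith_iff _ _).1 hc))

-- with the base matched, a full-prefix test is a prefix test on the remainder
theorem pv_sw_iff (s p gi : String) (r : List Char) (hn : s.toList = "04_output/".toList ++ r)
    (hp : p.toList = "04_output/".toList ++ (gi.toList ++ ['/'])) :
    (PySem.Str.startswith s p = true) ↔ ((gi.toList ++ ['/']) <+: r) := by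
  rw [PySem.Str.startswith_eq, PySem.Chars.startswith_iff, hp, hn, List.prefix_append_right_inj]

-- no '/' in the remainder: no full prefix matches
theorem pv_no_slash (r g : List Char) (h : ¬ (['/'] <:+: r)) : ¬ ((g ++ ['/']) <+: r) :=
  fun hp => h ((List.suffix_append g ['/']).isInfix.trans hp.isInfix)

-- the full-prefix test for a group is exactly "the extracted segment is that group"
theorem pv_cond (s p gi seg : String) (r : List Char)
    (hn : s.toList = "04_output/".toList ++ r)
    (hp : p.toList = "04_output/".toList ++ (gi.toList ++ ['/']))
    (hg : '/' ∉ gi.toList)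
    (hi : 0 ≤ PySem.Chars.find r ['/'])
    (hseg : seg.toList = r.take (PySem.Chars.find r ['/']).toNat) :
    (PySem.Str.startswith s p = true) ↔ seg = gi := by
  rw [pv_sw_iff s p gi r hn hp, pv_key r _ hg hi, ← hseg]
  exact ⟨fun h => String.toList_inj.mp h, fun h => by rw [h]⟩

-- ===== VERDICT (by name: the statement is the Claim_ definition above) =====
theorem artifact_group_for_path_py_spec : Claim_equal_artifact_group_for_path_py := by
  intro path _
  simp only [Spec_artifact_group_for_path_py, artifact_group_for_path_py,
    artifact_group_for_path_py_alt]
  generalize PySem.Str.lower path = s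
  by_cases hb : PySem.Str.startswith s "04_output/" = true
  · rw [if_pos hb]
    have hpre : "04_output/".toList <+: s.toList :=
      (PySem.Chars.startswith_iff _ _).1 (by rw [← PySem.Str.startswith_eq]; exact hb)
    obtain ⟨r, hr⟩ := hpre
    have hn : s.toList = "04_output/".toList ++ r := hr.symm
    have hrest : (PySem.Str.slice s (some (PySem.Str.len "04_output/")) none).toList = r := by
      rw [PySem.Str.toList_slice, PySem.Chars.slice_eq_listSlice,
        show PySem.Str.len "04_output/" = (10 : Int) from by decide,
        PySem.List.slice_from s.toList (by norm_num), hn]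
      exact List.drop_left' (by decide)
    have hfind : PySem.Str.find (PySem.Str.slice s (some (PySem.Str.len "04_output/")) none) "/"
        = PySem.Chars.find r ['/'] := by
      rw [PySem.Str.find_eq, hrest]; rfl
    rw [hfind]
    by_cases hi : PySem.Chars.find r ['/'] < 0
    · rw [if_pos hi]
      have hneg : PySem.Chars.find r ['/'] = -1 := by
        have := PySem.Chars.neg_one_le_find r ['/']; omega
      have hns : ¬ (['/'] <:+: r) := (PySem.Chars.find_eq_neg_one_iff _ _).1 hneg
      simp only [pvAgLoop, pvKnownPrefixes]
      rw [if_neg (fun hc => pv_no_slash r _ hns ((pv_sw_iff s "04_output/youtube_16x9/" "youtube_16x9" r hn rfl).1 hc))]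
      rw [if_neg (fun hc => pv_no_slash r _ hns ((pv_sw_iff s "04_output/vertical_9x16/" "vertical_9x16" r hn rfl).1 hc))]
      rw [if_neg (fun hc => pv_no_slash r _ hns ((pv_sw_iff s "04_output/square_1x1/" "square_1x1" r hn rfl).1 hc))]
      rw [if_neg (fun hc => pv_no_slash r _ hns ((pv_sw_iff s "04_output/teasers/" "teasers" r hn rfl).1 hc))]
      rw [if_neg (fun hc => pv_no_slash r _ hns ((pv_sw_iff s "04_output/clean_visualizer/" "clean_visualizer" r hn rfl).1 hc))]
      rw [if_neg (fun hc => pv_no_slash r _ hns ((pv_sw_iff s "04_output/lyric_visualizer/" "lyric_visualizer" r hn rfl).1 hc))]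
      rw [if_neg (fun hc => pv_no_slash r _ hns ((pv_sw_iff s "04_output/promo_cards/" "promo_cards" r hn rfl).1 hc))]
      rw [if_neg (fun hc => pv_no_slash r _ hns ((pv_sw_iff s "04_output/release_bundle/" "release_bundle" r hn rfl).1 hc))]
    · rw [if_neg hi]
      have hi' : 0 ≤ PySem.Chars.find r ['/'] := by omega
      set seg := PySem.Str.slice (PySem.Str.slice s (some (PySem.Str.len "04_output/")) none)
        none (some (PySem.Chars.find r ['/'])) with hsegdef
      have hseg : seg.toList = r.take (PySem.Chars.find r ['/']).toNat := by
        rw [hsegdef, PySem.Str.toList_slice, PySem.Chars.slice_eq_listSlice, hrest,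
          PySem.List.slice_to r hi']
      have hc1 := pv_cond s "04_output/youtube_16x9/" "youtube_16x9" seg r hn rfl (by decide) hi' hseg
      have hc2 := pv_cond s "04_output/vertical_9x16/" "vertical_9x16" seg r hn rfl (by decide) hi' hseg
      have hc3 := pv_cond s "04_output/square_1x1/" "square_1x1" seg r hn rfl (by decide) hi' hseg
      have hc4 := pv_cond s "04_output/teasers/" "teasers" seg r hn rfl (by decide) hi' hseg
      have hc5 := pv_cond s "04_output/clean_visualizer/" "clean_visualizer" seg r hn rfl (by decide) hi' hseg
      have hc6 := pv_cond s "04_output/lyric_visualizer/" "lyric_visualizer" seg r hn rfl (by decide) hi' hseg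
      have hc7 := pv_cond s "04_output/promo_cards/" "promo_cards" seg r hn rfl (by decide) hi' hseg
      have hc8 := pv_cond s "04_output/release_bundle/" "release_bundle" seg r hn rfl (by decide) hi' hseg
      simp only [pvAgLoop, pvKnownPrefixes]
      by_cases h1 : seg = "youtube_16x9"
      · rw [if_pos (hc1.2 h1), h1, if_pos (by decide)]
        decide
      rw [if_neg (fun hc => h1 (hc1.1 hc))]
      by_cases h2 : seg = "vertical_9x16"
      · rw [if_pos (hc2.2 h2), h2, if_pos (by decide)]
        decide
      rw [if_neg (fun hc => h2 (hc2.1 hc))]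
      by_cases h3 : seg = "square_1x1"
      · rw [if_pos (hc3.2 h3), h3, if_pos (by decide)]
        decide
      rw [if_neg (fun hc => h3 (hc3.1 hc))]
      by_cases h4 : seg = "teasers"
      · rw [if_pos (hc4.2 h4), h4, if_pos (by decide)]
        decide
      rw [if_neg (fun hc => h4 (hc4.1 hc))]
      by_cases h5 : seg = "clean_visualizer"
      · rw [if_pos (hc5.2 h5), h5, if_pos (by decide)]
        decide
      rw [if_neg (fun hc => h5 (hc5.1 hc))]
      by_cases h6 : seg = "lyric_visualizer"
      · rw [if_pos (hc6.2 h6), h6, if_pos (by decide)]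
        decide
      rw [if_neg (fun hc => h6 (hc6.1 hc))]
      by_cases h7 : seg = "promo_cards"
      · rw [if_pos (hc7.2 h7), h7, if_pos (by decide)]
        decide
      rw [if_neg (fun hc => h7 (hc7.1 hc))]
      by_cases h8 : seg = "release_bundle"
      · rw [if_pos (hc8.2 h8), h8, if_pos (by decide)]
        decide
      rw [if_neg (fun hc => h8 (hc8.1 hc))]
      have hnc : pvGroups.contains seg = false := by
        have hpg : pvGroups = ["youtube_16x9", "vertical_9x16", "square_1x1", "teasers", "clean_visualizer", "lyric_visualizer", "promo_cards", "release_bundle"] := by decide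
        rw [hpg]
        simp [h1, h2, h3, h4, h5, h6, h7, h8]
      rw [hnc]
      simp
  · rw [if_neg hb]
    have hnp : ¬ ("04_output/".toList <+: s.toList) := fun hc =>
      hb (by rw [PySem.Str.startswith_eq, PySem.Chars.startswith_iff]; exact hc)
    simp only [pvAgLoop, pvKnownPrefixes]
    rw [pv_sw_false s "04_output/youtube_16x9/" hnp ⟨"youtube_16x9/".toList, rfl⟩]
    rw [pv_sw_false s "04_output/vertical_9x16/" hnp ⟨"vertical_9x16/".toList, rfl⟩]
    rw [pv_sw_false s "04_output/square_1x1/" hnp ⟨"square_1x1/".toList, rfl⟩]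
    rw [pv_sw_false s "04_output/teasers/" hnp ⟨"teasers/".toList, rfl⟩]
    rw [pv_sw_false s "04_output/clean_visualizer/" hnp ⟨"clean_visualizer/".toList, rfl⟩]
    rw [pv_sw_false s "04_output/lyric_visualizer/" hnp ⟨"lyric_visualizer/".toList, rfl⟩]
    rw [pv_sw_false s "04_output/promo_cards/" hnp ⟨"promo_cards/".toList, rfl⟩]
    rw [pv_sw_false s "04_output/release_bundle/" hnp ⟨"release_bundle/".toList, rfl⟩]
    simp
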